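-- pv_equiv track=rewrite | github.com/Serfeg/Anime-Girls-BPA18-02 | Задание 2/Шварц/erina_solution.py | very_even
-- ===== SOURCE A (Python) =====
-- def very_even(n):
--     try:
--         if len(str(n)) == 1:
--             if (int(n) % 2 == 0) or (int(n) == 0):
--                 return True
--             else:
--                 return False
--         else:
--             num = 0
--             n = str(n)
--             for x in n:
--                 num = num + int(x)
--             return very_even(num)
--     except ValueError:
--         return "Введено недопустимое значение"
-- ===== SOURCE B (Python) =====
-- def very_even(n):
--     # Iterative, purely arithmetic digit-sum reduction (no string round-trips).
--     while n > 9: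
--         s = 0
--         while n:
--             s += n % 10
--             n //= 10
--         n = s
--     return n % 2 == 0
-- ===== Notes on version B (the rewrite author's own statement) =====
-- stated objective: simpler
-- what changed: Replaces the str(n)-based recursion with an iterative while-loop that extracts digits arithmetically via % 10 and // 10, with no string conversions, recursion or try/except.
-- outside the precondition, e.g. on very_even(-7): A returns 'Введено недопустимое значение', B returns False
import Mathlib
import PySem

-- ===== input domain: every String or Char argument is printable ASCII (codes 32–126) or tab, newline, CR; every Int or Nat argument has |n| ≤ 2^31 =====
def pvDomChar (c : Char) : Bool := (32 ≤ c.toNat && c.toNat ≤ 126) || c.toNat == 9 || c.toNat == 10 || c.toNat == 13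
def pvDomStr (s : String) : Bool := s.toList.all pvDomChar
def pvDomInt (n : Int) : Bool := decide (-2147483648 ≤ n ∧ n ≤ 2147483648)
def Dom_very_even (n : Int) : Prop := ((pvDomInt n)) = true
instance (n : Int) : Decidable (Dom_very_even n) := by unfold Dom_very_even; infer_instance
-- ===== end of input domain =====

-- B replaces A's str(n)-based recursion by an iterative, purely arithmetic digit-sum loop (% 10 / // 10); objective: simpler.


-- ===== PORT A =====
-- int(x) for a single character x; `.getD 0` is only reached where Python's int(x) raises
-- ValueError (the '-' of a negative n), which Pre_very_even excludes.
def pvIntOfChar (c : Char) : Int := (PySem.Int.ofChars? [c]).getD 0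

-- A's recursion `very_even(num)`, made total with a fuel counter (fuel only guards
-- termination; on Pre_ the digit sum strictly decreases, so natAbs+1 fuel is never exhausted).
def very_evenGo : Nat → Int → Bool
  | 0, _ => false
  | fuel + 1, n =>
    if (PySem.Int.toChars n).length = 1 then
      -- (int(n) % 2 == 0) or (int(n) == 0)
      (PySem.Int.mod n 2 == 0) || (n == 0)
    else
      -- num = 0; for x in str(n): num = num + int(x); return very_even(num)
      very_evenGo fuel ((PySem.Int.toChars n).foldl (fun num x => num + pvIntOfChar x) 0)

def very_even (n : Int) : Bool := very_evenGo (n.natAbs + 1) n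

-- ===== PORT B =====
-- inner `while n: s += n % 10; n //= 10` (fuel-guarded, condition tested first)
def pvSumDigitsLoop : Nat → Int → Int → Int
  | 0, _, s => s
  | fuel + 1, n, s =>
    if n == 0 then s
    else pvSumDigitsLoop fuel (PySem.Int.floordiv n 10) (s + PySem.Int.mod n 10)

-- outer `while n > 9: … ; n = s`, then `return n % 2 == 0`
def very_evenAltGo : Nat → Int → Bool
  | 0, n => PySem.Int.mod n 2 == 0
  | fuel + 1, n =>
    if 9 < n then very_evenAltGo fuel (pvSumDigitsLoop (n.natAbs + 1) n 0)
    else PySem.Int.mod n 2 == 0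

def very_even_alt (n : Int) : Bool := very_evenAltGo (n.natAbs + 1) n

-- ===== PRECONDITION & SPEC =====
-- Pre_ excludes negative n, on which A's int('-') raises ValueError and A returns the Russian
-- error STRING (not a Bool, so no value of the declared return type).
def Pre_very_even (n : Int) : Prop := 0 ≤ n
instance (n : Int) : Decidable (Pre_very_even n) := by unfold Pre_very_even; infer_instance
def pvWitness_very_even : Int := (12345)

def Spec_very_even (n : Int) (out : Bool) : Prop := out = very_even_alt n
instance (n : Int) (out : Bool) : Decidable (Spec_very_even n out) := by unfold Spec_very_even; infer_instance

-- ===== CLAIM (what is proved, stated in full; the proofs are below) =====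
def Claim_equal_very_even : Prop := ∀ (n : Int), Dom_very_even n → Pre_very_even n → Spec_very_even n (very_even n)

-- ===== LEMMAS AND PROOFS =====

theorem pvIntOfChar_digitChar {d : Nat} (hd : d < 10) :
    pvIntOfChar (Nat.digitChar d) = (d : Int) := by
  interval_cases d <;> decide

theorem pv_toChars_natCast (m : Nat) :
    PySem.Int.toChars (m : Int) = Nat.toDigits 10 m := by
  simp [PySem.Int.toChars]

theorem pv_lt_ten_pow_succ (m : Nat) : m < 10 ^ (m + 1) :=
  lt_of_lt_of_le (Nat.lt_pow_self (by norm_num)) (Nat.pow_le_pow_right (by norm_num) (Nat.le_succ m))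

-- length of core's toDigitsCore, given enough fuel
theorem pv_toDigitsCore_length :
    ∀ (fuel n : Nat) (ds : List Char), 0 < fuel → n < 10 ^ fuel →
      (Nat.toDigitsCore 10 fuel n ds).length = ds.length + Nat.log 10 n + 1 := by
  intro fuel
  induction fuel with
  | zero => intro n ds h; omega
  | succ f ih =>
    intro n ds _ hlt
    simp only [Nat.toDigitsCore]
    by_cases h0 : n / 10 = 0
    · have : Nat.log 10 n = 0 := Nat.log_eq_zero_iff.2 (Or.inl (by omega))
      simp [h0, this]
    · have hn10 : 10 ≤ n := by
        by_contra h
        exact h0 (Nat.div_eq_of_lt (by omega))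
      have hf : 0 < f := by
        rcases Nat.eq_zero_or_pos f with hf0 | hf0
        · subst hf0; simp at hlt; omega
        · exact hf0
      have hlt' : n / 10 < 10 ^ f :=
        Nat.div_lt_of_lt_mul (by rw [pow_succ] at hlt; omega)
      rw [if_neg h0, ih (n / 10) _ hf hlt', Nat.log_div_base]
      have : 1 ≤ Nat.log 10 n := Nat.log_pos (by norm_num) hn10
      simp; omega

-- digit-value sum of toDigitsCore's output
theorem pv_toDigitsCore_sum :
    ∀ (fuel n : Nat) (ds : List Char), n < 10 ^ fuel →
      ((Nat.toDigitsCore 10 fuel n ds).map pvIntOfChar).sum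
        = ((Nat.digits 10 n).sum : Int) + ((ds.map pvIntOfChar).sum) := by
  intro fuel
  induction fuel with
  | zero =>
    intro n ds h
    have : n = 0 := by omega
    subst this; simp [Nat.toDigitsCore]
  | succ f ih =>
    intro n ds hlt
    simp only [Nat.toDigitsCore]
    have hm : n % 10 < 10 := Nat.mod_lt _ (by norm_num)
    have hd : pvIntOfChar (Nat.digitChar (n % 10)) = ((n % 10 : Nat) : Int) :=
      pvIntOfChar_digitChar hm
    by_cases h0 : n / 10 = 0
    · have hn : n < 10 := Nat.lt_of_div_eq_zero (by norm_num) h0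
      rw [if_pos h0]
      rcases Nat.eq_zero_or_pos n with h | h
      · subst h; simp [hd]
      · rw [Nat.digits_def' (by norm_num : 1 < 10) h]
        have h0' : Nat.digits 10 (n / 10) = [] := by rw [h0]; simp
        simp [h0', hd]
    · have hn : 0 < n := by
        rcases Nat.eq_zero_or_pos n with h | h
        · exact absurd (by simp [h]) h0
        · exact h
      have hlt' : n / 10 < 10 ^ f :=
        Nat.div_lt_of_lt_mul (by rw [pow_succ] at hlt; omega)
      rw [if_neg h0, ih (n / 10) _ hlt', Nat.digits_def' (by norm_num : 1 < 10) hn]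
      simp [hd]
      ring

-- A's per-round digit sum equals the numeric digit sum
theorem pvA_digitSum (m : Nat) :
    (PySem.Int.toChars (m : Int)).foldl (fun num x => num + pvIntOfChar x) 0
      = ((Nat.digits 10 m).sum : Int) := by
  rw [pv_toChars_natCast, PySem.List.foldl_add]
  have := pv_toDigitsCore_sum (m + 1) m [] (pv_lt_ten_pow_succ m)
  simp [Nat.toDigits] at this ⊢
  simpa using this

-- length of str(m) for a natural m
theorem pvA_len (m : Nat) :
    (PySem.Int.toChars (m : Int)).length = Nat.log 10 m + 1 := by
  rw [pv_toChars_natCast]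
  simpa using pv_toDigitsCore_length (m + 1) m [] (Nat.succ_pos m) (pv_lt_ten_pow_succ m)

-- B's inner while-loop computes the numeric digit sum
theorem pvB_sumDigitsLoop :
    ∀ (fuel m : Nat) (s : Int), m < 10 ^ fuel →
      pvSumDigitsLoop fuel (m : Int) s = s + ((Nat.digits 10 m).sum : Int) := by
  intro fuel
  induction fuel with
  | zero =>
    intro m s h
    have : m = 0 := by omega
    subst this; simp [pvSumDigitsLoop]
  | succ f ih =>
    intro m s hlt
    simp only [pvSumDigitsLoop]
    rcases Nat.eq_zero_or_pos m with h | h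
    · subst h; simp
    · have hne : ¬((m : Int) == 0) = true := by simp; omega
      have hlt' : m / 10 < 10 ^ f := Nat.div_lt_of_lt_mul (by rw [pow_succ] at hlt; omega)
      have hfd : PySem.Int.floordiv (m : Int) 10 = ((m / 10 : Nat) : Int) := by
        exact_mod_cast PySem.Int.floordiv_natCast m 10
      have hmd : PySem.Int.mod (m : Int) 10 = ((m % 10 : Nat) : Int) := by
        exact_mod_cast PySem.Int.mod_natCast m 10
      rw [if_neg (by simpa using hne)]
      rw [hfd, hmd, ih (m / 10) _ hlt', Nat.digits_def' (by norm_num : 1 < 10) h]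
      simp [List.sum_cons]
      ring

-- strict decrease of the digit sum for m ≥ 10
theorem pv_digitSum_lt {m : Nat} (hm : 10 ≤ m) : (Nat.digits 10 m).sum < m := by
  rw [Nat.digits_def' (by norm_num : 1 < 10) (by omega)]
  have h1 : (Nat.digits 10 (m / 10)).sum ≤ m / 10 := Nat.digit_sum_le 10 (m / 10)
  have h2 : m % 10 < 10 := Nat.mod_lt _ (by norm_num)
  have h3 : 1 ≤ m / 10 := Nat.le_div_iff_mul_le (by norm_num) |>.2 (by omega)
  have h4 : m % 10 + 10 * (m / 10) = m := Nat.mod_add_div m 10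
  simp only [List.sum_cons]
  omega

-- the single-digit branches agree
theorem pv_single (m : Nat) (hm : m < 10) :
    ((PySem.Int.mod (m : Int) 2 == 0) || ((m : Int) == 0)) = (PySem.Int.mod (m : Int) 2 == 0) := by
  interval_cases m <;> decide

-- main equivalence of the two fueled loops, by strong induction on m
theorem pv_main :
    ∀ (m fa fb : Nat), m < fa → m < fb →
      very_evenGo fa (m : Int) = very_evenAltGo fb (m : Int) := by
  intro m
  induction m using Nat.strong_induction_on with
  | _ m ih =>
    intro fa fb hfa hfb
    obtain ⟨fa', rfl⟩ : ∃ fa', fa = fa' + 1 := ⟨fa - 1, by omega⟩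
    obtain ⟨fb', rfl⟩ : ∃ fb', fb = fb' + 1 := ⟨fb - 1, by omega⟩
    simp only [very_evenGo, very_evenAltGo]
    by_cases hm : m < 10
    · rw [if_pos (by rw [pvA_len]; simp [Nat.log_eq_zero_iff.2 (Or.inl hm)]),
        if_neg (by exact_mod_cast by omega : ¬(9 : Int) < (m : Int))]
      exact pv_single m hm
    · rw [Nat.not_lt] at hm
      have hlen : ¬(PySem.Int.toChars (m : Int)).length = 1 := by
        rw [pvA_len]
        have : 1 ≤ Nat.log 10 m := Nat.log_pos (by norm_num) hm
        omega
      rw [if_neg hlen, if_pos (by exact_mod_cast by omega : (9 : Int) < (m : Int))]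
      rw [pvA_digitSum m]
      have hnat : ((m : Int)).natAbs = m := Int.natAbs_natCast m
      rw [hnat, pvB_sumDigitsLoop (m + 1) m 0 (pv_lt_ten_pow_succ m), zero_add]
      have hlt : (Nat.digits 10 m).sum < m := pv_digitSum_lt hm
      exact ih _ hlt fa' fb' (by omega) (by omega)

-- ===== VERDICT (by name: the statement is the Claim_ definition above) =====
theorem very_even_spec : Claim_equal_very_even := by
  intro n _ hpre
  unfold Spec_very_even very_even very_even_alt
  obtain ⟨m, rfl⟩ : ∃ m : Nat, n = (m : Int) := ⟨n.toNat, (Int.toNat_of_nonneg hpre).symm⟩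
  rw [Int.natAbs_natCast]
  exact pv_main m (m + 1) (m + 1) (Nat.lt_succ_self m) (Nat.lt_succ_self m)
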